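-- pv_equiv track=rewrite | github.com/dohch/Cifrado-y-descifrado-con-vignere | rutas.py | obtener_coordenadas
-- ===== SOURCE A (Python) =====
-- def obtener_coordenadas(filas, columnas, ruta):
--     coords = []
--     if "1. Columnas (Abajo)" in ruta:
--         for c in range(columnas):
--             for f in range(filas): coords.append((f, c))
--     elif "2. Columnas (Arriba)" in ruta:
--         for c in range(columnas):
--             for f in range(filas-1, -1, -1): coords.append((f, c))
--     elif "3. Filas (Izq-Der)" in ruta:
--         for f in range(filas):
--             for c in range(columnas): coords.append((f, c))
--     elif "4. Filas (Der-Izq)" in ruta: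
--         for f in range(filas):
--             for c in range(columnas-1, -1, -1): coords.append((f, c))
--     elif "5. Zigzag / Serpentina" in ruta:
--         for f in range(filas):
--             r = range(columnas) if f % 2 == 0 else range(columnas-1, -1, -1)
--             for c in r: coords.append((f, c))
--     elif "6. Espiral (Horario)" in ruta:
--         t, b, l, r = 0, filas-1, 0, columnas-1
--         while t <= b and l <= r:
--             for i in range(l, r+1): coords.append((t, i))
--             t += 1
--             for i in range(t, b+1): coords.append((i, r))
--             r -= 1
--             if t <= b:
--                 for i in range(r, l-1, -1): coords.append((b, i))
--                 b -= 1
--             if l <= r: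
--                 for i in range(b, t-1, -1): coords.append((i, l))
--                 l += 1
--     elif "7. Espiral (Anti-horario)" in ruta:
--         t, b, l, r = 0, filas-1, 0, columnas-1
--         while t <= b and l <= r:
--             for i in range(t, b+1): coords.append((i, l))
--             l += 1
--             for i in range(l, r+1): coords.append((b, i))
--             b -= 1
--             if l <= r:
--                 for i in range(b, t-1, -1): coords.append((i, r))
--                 r -= 1
--             if t <= b:
--                 for i in range(r, l-1, -1): coords.append((t, i))
--                 t += 1
--     elif "8. Diagonal" in ruta:
--         for s in range(filas + columnas - 1):
--             for c in range(max(0, s - filas + 1), min(s + 1, columnas)):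
--                 f = s - c
--                 if f < filas: coords.append((f, c))
--     return coords
-- ===== SOURCE B (Python) =====
-- def obtener_coordenadas(filas, columnas, ruta):
--     def celdas(m, n):
--         # row-major cells of an m x n grid
--         return [(f, c) for f in range(m) for c in range(n)]
--
--     def por_columnas():
--         # column-major order = row-major traversal of the transposed grid, coordinates swapped back
--         return [(f, c) for (c, f) in celdas(columnas, filas)]
--
--     def anillo_cw(m, n):
--         # clockwise outer ring of an m x n grid (m, n >= 1), starting at (0, 0)
--         return ([(0, j) for j in range(n)]
--                 + [(i, n - 1) for i in range(1, m)]
--                 + ([(m - 1, j) for j in range(n - 2, -1, -1)] if m > 1 else [])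
--                 + ([(i, 0) for i in range(m - 2, 0, -1)] if n > 1 else []))
--
--     def anillo_ccw(m, n):
--         # counter-clockwise outer ring of an m x n grid (m, n >= 1), starting at (0, 0)
--         return ([(i, 0) for i in range(m)]
--                 + [(m - 1, j) for j in range(1, n)]
--                 + ([(i, n - 1) for i in range(m - 2, -1, -1)] if n > 1 else [])
--                 + ([(0, j) for j in range(n - 2, 0, -1)] if m > 1 else []))
--
--     def espiral(m, n, anillo):
--         # peel the outer ring, recurse on the inner (m-2) x (n-2) grid shifted by (1, 1)
--         if m <= 0 or n <= 0:
--             return []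
--         return anillo(m, n) + [(f + 1, c + 1) for f, c in espiral(m - 2, n - 2, anillo)]
--
--     def diagonal():
--         # column-major order visits each anti-diagonal bottom-to-top (c ascending); group by diagonal index
--         cm = por_columnas()
--         return [p for s in range(filas + columnas - 1) for p in cm if p[0] + p[1] == s]
--
--     tabla = [
--         ("1. Columnas (Abajo)", por_columnas),
--         ("2. Columnas (Arriba)", lambda: [(filas - 1 - f, c) for (f, c) in por_columnas()]),
--         ("3. Filas (Izq-Der)", lambda: celdas(filas, columnas)),
--         ("4. Filas (Der-Izq)", lambda: [(f, columnas - 1 - c) for (f, c) in celdas(filas, columnas)]),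
--         ("5. Zigzag / Serpentina", lambda: [(f, c) if f % 2 == 0 else (f, columnas - 1 - c)
--                                             for (f, c) in celdas(filas, columnas)]),
--         ("6. Espiral (Horario)", lambda: espiral(filas, columnas, anillo_cw)),
--         ("7. Espiral (Anti-horario)", lambda: espiral(filas, columnas, anillo_ccw)),
--         ("8. Diagonal", diagonal),
--     ]
--     for clave, generar in tabla:
--         if clave in ruta:
--             return generar()
--     return []
-- ===== Notes on version B (the rewrite author's own statement) =====
-- stated objective: alternative
-- what changed: B derives every straight-line traversal by coordinate transforms of a single row-major base grid, replaces the diagonal branch's clamped per-diagonal ranges by filtering the column-major base on the diagonal index, turns the if/elif chain into a first-match key/handler table, and replaces both spiral while-loops over four shrinking boundary variables by a recursive ring-peeling decomposition (emit the outer ring, recurse on the shifted (m-2)x(n-2) inner grid).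
import Mathlib
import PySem

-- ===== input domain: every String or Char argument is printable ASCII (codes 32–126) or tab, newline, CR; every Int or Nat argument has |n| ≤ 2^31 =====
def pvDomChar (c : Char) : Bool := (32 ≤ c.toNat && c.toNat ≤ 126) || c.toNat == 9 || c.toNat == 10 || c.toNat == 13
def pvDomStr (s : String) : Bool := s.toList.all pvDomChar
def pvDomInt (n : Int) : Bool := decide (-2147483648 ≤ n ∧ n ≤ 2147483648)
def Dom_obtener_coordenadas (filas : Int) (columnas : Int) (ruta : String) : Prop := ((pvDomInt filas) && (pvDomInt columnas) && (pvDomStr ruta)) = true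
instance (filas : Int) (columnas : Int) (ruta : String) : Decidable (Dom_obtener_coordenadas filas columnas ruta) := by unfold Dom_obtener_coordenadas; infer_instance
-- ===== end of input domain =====

-- B builds every traversal from a single row-major base grid (branches 1-5 are coordinate
-- transforms of it, the diagonal branch filters the column-major base by diagonal index),
-- dispatches through a first-match key/handler table, and replaces both boundary-variable
-- spiral while-loops by a recursive ring-peeling decomposition; objective: alternative.


-- ===== PORT A =====
-- A's "6. Espiral (Horario)" while-loop over the four shrinking boundaries t b l r.
-- The Nat fuel only makes the recursion structural; (filas + columnas).toNat steps always suffice.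
def pvALoopCW : Nat → Int → Int → Int → Int → List (Int × Int) → List (Int × Int)
  | 0, _, _, _, _, coords => coords
  | fuel + 1, t, b, l, r, coords =>
    if t ≤ b ∧ l ≤ r then
      let c1 := (PySem.List.pyRange l (r + 1) 1).foldl (fun acc i => acc ++ [(t, i)]) coords
      let t1 := t + 1
      let c2 := (PySem.List.pyRange t1 (b + 1) 1).foldl (fun acc i => acc ++ [(i, r)]) c1
      let r1 := r - 1
      let c3 := if t1 ≤ b then (PySem.List.pyRange r1 (l - 1) (-1)).foldl (fun acc i => acc ++ [(b, i)]) c2 else c2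
      let b1 := if t1 ≤ b then b - 1 else b
      let c4 := if l ≤ r1 then (PySem.List.pyRange b1 (t1 - 1) (-1)).foldl (fun acc i => acc ++ [(i, l)]) c3 else c3
      let l1 := if l ≤ r1 then l + 1 else l
      pvALoopCW fuel t1 b1 l1 r1 c4
    else coords

-- A's "7. Espiral (Anti-horario)" while-loop.
def pvALoopCCW : Nat → Int → Int → Int → Int → List (Int × Int) → List (Int × Int)
  | 0, _, _, _, _, coords => coords
  | fuel + 1, t, b, l, r, coords =>
    if t ≤ b ∧ l ≤ r then
      let c1 := (PySem.List.pyRange t (b + 1) 1).foldl (fun acc i => acc ++ [(i, l)]) coords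
      let l1 := l + 1
      let c2 := (PySem.List.pyRange l1 (r + 1) 1).foldl (fun acc i => acc ++ [(b, i)]) c1
      let b1 := b - 1
      let c3 := if l1 ≤ r then (PySem.List.pyRange b1 (t - 1) (-1)).foldl (fun acc i => acc ++ [(i, r)]) c2 else c2
      let r1 := if l1 ≤ r then r - 1 else r
      let c4 := if t ≤ b1 then (PySem.List.pyRange r1 (l1 - 1) (-1)).foldl (fun acc i => acc ++ [(t, i)]) c3 else c3
      let t1 := if t ≤ b1 then t + 1 else t
      pvALoopCCW fuel t1 b1 l1 r1 c4
    else coords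

def obtener_coordenadas (filas : Int) (columnas : Int) (ruta : String) : List (Int × Int) :=
  if PySem.Str.isIn "1. Columnas (Abajo)" ruta then
    (PySem.List.pyRange 0 columnas 1).foldl (fun acc c =>
      (PySem.List.pyRange 0 filas 1).foldl (fun acc f => acc ++ [(f, c)]) acc) []
  else if PySem.Str.isIn "2. Columnas (Arriba)" ruta then
    (PySem.List.pyRange 0 columnas 1).foldl (fun acc c =>
      (PySem.List.pyRange (filas - 1) (-1) (-1)).foldl (fun acc f => acc ++ [(f, c)]) acc) []
  else if PySem.Str.isIn "3. Filas (Izq-Der)" ruta then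
    (PySem.List.pyRange 0 filas 1).foldl (fun acc f =>
      (PySem.List.pyRange 0 columnas 1).foldl (fun acc c => acc ++ [(f, c)]) acc) []
  else if PySem.Str.isIn "4. Filas (Der-Izq)" ruta then
    (PySem.List.pyRange 0 filas 1).foldl (fun acc f =>
      (PySem.List.pyRange (columnas - 1) (-1) (-1)).foldl (fun acc c => acc ++ [(f, c)]) acc) []
  else if PySem.Str.isIn "5. Zigzag / Serpentina" ruta then
    (PySem.List.pyRange 0 filas 1).foldl (fun acc f =>
      (if PySem.Int.mod f 2 = 0 then PySem.List.pyRange 0 columnas 1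
       else PySem.List.pyRange (columnas - 1) (-1) (-1)).foldl (fun acc c => acc ++ [(f, c)]) acc) []
  else if PySem.Str.isIn "6. Espiral (Horario)" ruta then
    pvALoopCW (filas + columnas).toNat 0 (filas - 1) 0 (columnas - 1) []
  else if PySem.Str.isIn "7. Espiral (Anti-horario)" ruta then
    pvALoopCCW (filas + columnas).toNat 0 (filas - 1) 0 (columnas - 1) []
  else if PySem.Str.isIn "8. Diagonal" ruta then
    (PySem.List.pyRange 0 (filas + columnas - 1) 1).foldl (fun acc s =>
      (PySem.List.pyRange (max 0 (s - filas + 1)) (min (s + 1) columnas) 1).foldl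
        (fun acc c => if s - c < filas then acc ++ [(s - c, c)] else acc) acc) []
  else []

-- ===== PORT B =====
-- row-major cells of an m x n grid
def pvBceldas (m n : Int) : List (Int × Int) :=
  (PySem.List.pyRange 0 m 1).flatMap (fun f => (PySem.List.pyRange 0 n 1).map (fun c => (f, c)))

-- column-major order = row-major traversal of the transposed grid, coordinates swapped back
def pvBporColumnas (filas columnas : Int) : List (Int × Int) :=
  (pvBceldas columnas filas).map (fun p => (p.2, p.1))

-- clockwise outer ring of an m x n grid (m, n >= 1), starting at (0, 0)
def pvBanilloCW (m n : Int) : List (Int × Int) :=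
  (PySem.List.pyRange 0 n 1).map (fun j => ((0 : Int), j))
  ++ (PySem.List.pyRange 1 m 1).map (fun i => (i, n - 1))
  ++ (if 1 < m then (PySem.List.pyRange (n - 2) (-1) (-1)).map (fun j => (m - 1, j)) else [])
  ++ (if 1 < n then (PySem.List.pyRange (m - 2) 0 (-1)).map (fun i => (i, (0 : Int))) else [])

-- counter-clockwise outer ring of an m x n grid (m, n >= 1), starting at (0, 0)
def pvBanilloCCW (m n : Int) : List (Int × Int) :=
  (PySem.List.pyRange 0 m 1).map (fun i => (i, (0 : Int)))
  ++ (PySem.List.pyRange 1 n 1).map (fun j => (m - 1, j))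
  ++ (if 1 < n then (PySem.List.pyRange (m - 2) (-1) (-1)).map (fun i => (i, n - 1)) else [])
  ++ (if 1 < m then (PySem.List.pyRange (n - 2) 0 (-1)).map (fun j => ((0 : Int), j)) else [])

-- peel the outer ring, recurse on the inner (m-2) x (n-2) grid shifted by (1, 1)
-- (the Nat fuel only makes the recursion structural; m.toNat steps always suffice)
def pvBespiral (anillo : Int → Int → List (Int × Int)) : Nat → Int → Int → List (Int × Int)
  | 0, _, _ => []
  | fuel + 1, m, n =>
    if m ≤ 0 ∨ n ≤ 0 then []
    else anillo m n ++ (pvBespiral anillo fuel (m - 2) (n - 2)).map (fun p => (p.1 + 1, p.2 + 1))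

-- column-major order visits each anti-diagonal bottom-to-top (c ascending); group by diagonal index
def pvBdiagonal (filas columnas : Int) : List (Int × Int) :=
  (PySem.List.pyRange 0 (filas + columnas - 1) 1).flatMap
    (fun s => (pvBporColumnas filas columnas).filter (fun p => p.1 + p.2 == s))

-- first-match scan of the key/handler table
def pvBdispatch (tabla : List (String × (Unit → List (Int × Int)))) (ruta : String) : List (Int × Int) :=
  match tabla with
  | [] => []
  | (clave, generar) :: rest =>
    if PySem.Str.isIn clave ruta then generar () else pvBdispatch rest ruta

def obtener_coordenadas_alt (filas : Int) (columnas : Int) (ruta : String) : List (Int × Int) :=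
  pvBdispatch
    [ ("1. Columnas (Abajo)", fun _ => pvBporColumnas filas columnas),
      ("2. Columnas (Arriba)", fun _ =>
        (pvBporColumnas filas columnas).map (fun p => (filas - 1 - p.1, p.2))),
      ("3. Filas (Izq-Der)", fun _ => pvBceldas filas columnas),
      ("4. Filas (Der-Izq)", fun _ =>
        (pvBceldas filas columnas).map (fun p => (p.1, columnas - 1 - p.2))),
      ("5. Zigzag / Serpentina", fun _ =>
        (pvBceldas filas columnas).map
          (fun p => if PySem.Int.mod p.1 2 = 0 then p else (p.1, columnas - 1 - p.2))),
      ("6. Espiral (Horario)", fun _ => pvBespiral pvBanilloCW filas.toNat filas columnas),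
      ("7. Espiral (Anti-horario)", fun _ => pvBespiral pvBanilloCCW filas.toNat filas columnas),
      ("8. Diagonal", fun _ => pvBdiagonal filas columnas) ]
    ruta

-- ===== PRECONDITION & SPEC =====
def Spec_obtener_coordenadas (filas : Int) (columnas : Int) (ruta : String) (out : List (Int × Int)) : Prop := out = obtener_coordenadas_alt filas columnas ruta
instance (filas : Int) (columnas : Int) (ruta : String) (out : List (Int × Int)) : Decidable (Spec_obtener_coordenadas filas columnas ruta out) := by unfold Spec_obtener_coordenadas; infer_instance

-- ===== CLAIM (what is proved, stated in full; the proofs are below) =====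
def Claim_equal_obtener_coordenadas : Prop := ∀ (filas : Int) (columnas : Int) (ruta : String), Dom_obtener_coordenadas filas columnas ruta → Spec_obtener_coordenadas filas columnas ruta (obtener_coordenadas filas columnas ruta)

-- ===== LEMMAS AND PROOFS =====

-- a countdown range, as the reflection of a count-up range
lemma map_down {α : Type} (m : Int) (g : Int → α) :
    (PySem.List.pyRange (m - 1) (-1) (-1)).map g
      = (PySem.List.pyRange 0 m 1).map (fun k => g (m - 1 - k)) := by
  rw [PySem.List.pyRange_neg_one, PySem.List.pyRange_one, List.map_map, List.map_map]
  have h : (m - 1 - (-1)).toNat = (m - 0).toNat := by omega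
  rw [h]
  exact List.map_congr_left (fun k _ => by simp only [Function.comp_apply]; congr 1; ring)

lemma filter_pyRange_beq (m v : Int) :
    (PySem.List.pyRange 0 m 1).filter (fun y => y == v)
      = if 0 ≤ v ∧ v < m then [v] else [] := by
  rw [show (fun y : Int => y == v) = (· == v) from rfl, List.filter_beq]
  by_cases h : 0 ≤ v ∧ v < m
  · rw [if_pos h, List.count_eq_one_of_mem (PySem.List.nodup_pyRange_one 0 m)
      (PySem.List.mem_pyRange_one.mpr ⟨h.1, h.2⟩)]
    rfl
  · rw [if_neg h, List.count_eq_zero_of_not_mem (fun hm => h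
      (by simpa [PySem.List.mem_pyRange_one] using hm))]
    rfl

-- a flatMap of guarded singletons over [0, n) is a map over the clamped guard interval
lemma flatMap_guard {α : Type} (g : Int → α) (lo hi : Int) : ∀ (n : Int),
    (PySem.List.pyRange 0 n 1).flatMap (fun c => if lo ≤ c ∧ c < hi then [g c] else [])
      = (PySem.List.pyRange (max 0 lo) (min n hi) 1).map g := by
  have hnat : ∀ (k : Nat),
      (PySem.List.pyRange 0 (k : Int) 1).flatMap (fun c => if lo ≤ c ∧ c < hi then [g c] else [])
        = (PySem.List.pyRange (max 0 lo) (min (k : Int) hi) 1).map g := by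
    intro k
    induction k with
    | zero =>
      simp only [Nat.cast_zero]
      rw [PySem.List.pyRange_one_eq_nil (by omega),
        PySem.List.pyRange_one_eq_nil (show min (0 : Int) hi ≤ max 0 lo by omega)]
      rfl
    | succ k ih =>
      rw [show ((k + 1 : Nat) : Int) = (k : Int) + 1 by push_cast; ring,
        PySem.List.pyRange_one_succ_right (by omega), List.flatMap_append, ih]
      by_cases h1 : hi ≤ (k : Int)
      · rw [show min ((k : Int) + 1) hi = min (k : Int) hi by omega]
        have hnil : (if lo ≤ (k : Int) ∧ (k : Int) < hi then [g k] else []) = [] := by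
          rw [if_neg]; omega
        simp [hnil]
      · by_cases h2 : lo ≤ (k : Int)
        · rw [show min ((k : Int) + 1) hi = (k : Int) + 1 by omega,
            show min (k : Int) hi = (k : Int) by omega,
            PySem.List.pyRange_one_succ_right (show max 0 lo ≤ (k : Int) by omega),
            List.map_append]
          have hcond : lo ≤ (k : Int) ∧ (k : Int) < hi := ⟨h2, by omega⟩
          simp [hcond]
        · have hnil : (if lo ≤ (k : Int) ∧ (k : Int) < hi then [g k] else []) = [] := by
            rw [if_neg]; omega
          rw [PySem.List.pyRange_one_eq_nil (show min ((k : Int) + 1) hi ≤ max 0 lo by omega),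
            PySem.List.pyRange_one_eq_nil (show min (k : Int) hi ≤ max 0 lo by omega)]
          simp [hnil]
  intro n
  by_cases hn : 0 ≤ n
  · rw [show n = ((n.toNat : Nat) : Int) by omega, hnat]
  · rw [PySem.List.pyRange_one_eq_nil (by omega),
      PySem.List.pyRange_one_eq_nil (show min n hi ≤ max 0 lo by omega)]
    rfl

-- B's per-diagonal filter of the column-major base equals A's clamped per-diagonal range
lemma diag_col (filas columnas s : Int) :
    (pvBporColumnas filas columnas).filter (fun p => p.1 + p.2 == s)
      = ((PySem.List.pyRange (max 0 (s - filas + 1)) (min (s + 1) columnas) 1).filter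
          (fun c => decide (s - c < filas))).map (fun c => (s - c, c)) := by
  have hR : (PySem.List.pyRange (max 0 (s - filas + 1)) (min (s + 1) columnas) 1).filter
      (fun c => decide (s - c < filas))
      = PySem.List.pyRange (max 0 (s - filas + 1)) (min (s + 1) columnas) 1 :=
    List.filter_eq_self.mpr (fun c hc => by
      rw [PySem.List.mem_pyRange_one] at hc
      simp only [decide_eq_true_eq]; omega)
  rw [hR]
  simp only [pvBporColumnas, pvBceldas, List.map_flatMap, List.map_map, List.filter_flatMap,
    List.filter_map, Function.comp_def]
  have hstep : ∀ x : Int,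
      (((PySem.List.pyRange 0 filas 1).filter (fun y => y + x == s)).map (fun y => (y, x)))
        = if s - filas + 1 ≤ x ∧ x < s + 1 then [(s - x, x)] else [] := by
    intro x
    rw [List.filter_congr (fun y _ => show (y + x == s) = (y == s - x) from
      Bool.eq_iff_iff.mpr (by simp only [beq_iff_eq]; omega))]
    rw [filter_pyRange_beq]
    split_ifs with ha hb hb
    · rfl
    · exact absurd hb (by omega)
    · exact absurd ha (by omega)
    · rfl
  calc (PySem.List.pyRange 0 columnas 1).flatMap
        (fun x => ((PySem.List.pyRange 0 filas 1).filter (fun y => y + x == s)).map (fun y => (y, x)))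
      = (PySem.List.pyRange 0 columnas 1).flatMap
          (fun x => if s - filas + 1 ≤ x ∧ x < s + 1 then [(s - x, x)] else []) := by
        exact List.flatMap_congr (fun x _ => hstep x)
    _ = (PySem.List.pyRange (max 0 (s - filas + 1)) (min columnas (s + 1)) 1).map
          (fun x => (s - x, x)) := flatMap_guard _ _ _ _
    _ = _ := by rw [min_comm]

lemma map_pyRange_one_shift {α : Type} (a b c : Int) (f : Int → α) :
    (PySem.List.pyRange a b 1).map f
      = (PySem.List.pyRange (a - c) (b - c) 1).map (fun j => f (j + c)) := by
  rw [PySem.List.pyRange_one, PySem.List.pyRange_one, List.map_map, List.map_map]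
  have h : b - c - (a - c) = b - a := by ring
  rw [h]
  exact List.map_congr_left (fun k _ => by simp only [Function.comp_apply]; congr 1; ring)

lemma map_pyRange_neg_one_shift {α : Type} (a b c : Int) (f : Int → α) :
    (PySem.List.pyRange a b (-1)).map f
      = (PySem.List.pyRange (a - c) (b - c) (-1)).map (fun j => f (j + c)) := by
  rw [PySem.List.pyRange_neg_one, PySem.List.pyRange_neg_one, List.map_map, List.map_map]
  have h : a - c - (b - c) = a - b := by ring
  rw [h]
  exact List.map_congr_left (fun k _ => by simp only [Function.comp_apply]; congr 1; ring)

lemma seg_fst_pos (t l a1 b1 x' a2 b2 x : Int) (ha : a2 = a1 - t) (hb : b2 = b1 - t)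
    (hx : x = x' + l) :
    ((PySem.List.pyRange a2 b2 1).map (fun i => (i, x'))).map (fun p => (p.1 + t, p.2 + l))
      = (PySem.List.pyRange a1 b1 1).map (fun i => (i, x)) := by
  subst ha hb hx
  rw [map_pyRange_one_shift a1 b1 t, List.map_map]
  exact List.map_congr_left (fun k _ => rfl)

lemma seg_fst_neg (t l a1 b1 x' a2 b2 x : Int) (ha : a2 = a1 - t) (hb : b2 = b1 - t)
    (hx : x = x' + l) :
    ((PySem.List.pyRange a2 b2 (-1)).map (fun i => (i, x'))).map (fun p => (p.1 + t, p.2 + l))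
      = (PySem.List.pyRange a1 b1 (-1)).map (fun i => (i, x)) := by
  subst ha hb hx
  rw [map_pyRange_neg_one_shift a1 b1 t, List.map_map]
  exact List.map_congr_left (fun k _ => rfl)

lemma seg_snd_pos (t l a1 b1 x' a2 b2 x : Int) (ha : a2 = a1 - l) (hb : b2 = b1 - l)
    (hx : x = x' + t) :
    ((PySem.List.pyRange a2 b2 1).map (fun j => (x', j))).map (fun p => (p.1 + t, p.2 + l))
      = (PySem.List.pyRange a1 b1 1).map (fun i => (x, i)) := by
  subst ha hb hx
  rw [map_pyRange_one_shift a1 b1 l, List.map_map]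
  exact List.map_congr_left (fun k _ => rfl)

lemma seg_snd_neg (t l a1 b1 x' a2 b2 x : Int) (ha : a2 = a1 - l) (hb : b2 = b1 - l)
    (hx : x = x' + t) :
    ((PySem.List.pyRange a2 b2 (-1)).map (fun j => (x', j))).map (fun p => (p.1 + t, p.2 + l))
      = (PySem.List.pyRange a1 b1 (-1)).map (fun i => (x, i)) := by
  subst ha hb hx
  rw [map_pyRange_neg_one_shift a1 b1 l, List.map_map]
  exact List.map_congr_left (fun k _ => rfl)

lemma pvBespiral_nil (anillo : Int → Int → List (Int × Int)) (fuel : Nat) (m n : Int)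
    (h : m ≤ 0 ∨ n ≤ 0) : pvBespiral anillo fuel m n = [] := by
  cases fuel with
  | zero => rfl
  | succ fuel => simp only [pvBespiral]; exact if_pos h

lemma inner_shift (t l : Int) (xs : List (Int × Int)) :
    (xs.map (fun p => (p.1 + 1, p.2 + 1))).map (fun p => (p.1 + t, p.2 + l))
      = xs.map (fun p => (p.1 + (t + 1), p.2 + (l + 1))) := by
  rw [List.map_map]
  exact List.map_congr_left (fun p _ => by
    simp only [Function.comp_apply]
    exact Prod.ext (by ring) (by ring))

lemma ringCW_shift (t b l r : Int) :
    (pvBanilloCW (b - t + 1) (r - l + 1)).map (fun p => (p.1 + t, p.2 + l))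
      = (PySem.List.pyRange l (r + 1) 1).map (fun i => (t, i))
        ++ (PySem.List.pyRange (t + 1) (b + 1) 1).map (fun i => (i, r))
        ++ (if 1 < b - t + 1 then (PySem.List.pyRange (r - 1) (l - 1) (-1)).map (fun i => (b, i)) else [])
        ++ (if 1 < r - l + 1 then (PySem.List.pyRange (b - 1) t (-1)).map (fun i => (i, l)) else []) := by
  simp only [pvBanilloCW, List.map_append,
    apply_ite (List.map (fun p : Int × Int => (p.1 + t, p.2 + l))), List.map_nil]
  rw [seg_snd_pos t l l (r + 1) 0 0 (r - l + 1) t (by ring) (by ring) (by ring)]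
  rw [seg_fst_pos t l (t + 1) (b + 1) (r - l + 1 - 1) 1 (b - t + 1) r (by ring) (by ring) (by ring)]
  rw [seg_snd_neg t l (r - 1) (l - 1) (b - t + 1 - 1) (r - l + 1 - 2) (-1) b (by ring) (by ring) (by ring)]
  rw [seg_fst_neg t l (b - 1) t 0 (b - t + 1 - 2) 0 l (by ring) (by ring) (by ring)]

lemma ringCCW_shift (t b l r : Int) :
    (pvBanilloCCW (b - t + 1) (r - l + 1)).map (fun p => (p.1 + t, p.2 + l))
      = (PySem.List.pyRange t (b + 1) 1).map (fun i => (i, l))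
        ++ (PySem.List.pyRange (l + 1) (r + 1) 1).map (fun i => (b, i))
        ++ (if 1 < r - l + 1 then (PySem.List.pyRange (b - 1) (t - 1) (-1)).map (fun i => (i, r)) else [])
        ++ (if 1 < b - t + 1 then (PySem.List.pyRange (r - 1) l (-1)).map (fun i => (t, i)) else []) := by
  simp only [pvBanilloCCW, List.map_append,
    apply_ite (List.map (fun p : Int × Int => (p.1 + t, p.2 + l))), List.map_nil]
  rw [seg_fst_pos t l t (b + 1) 0 0 (b - t + 1) l (by ring) (by ring) (by ring)]
  rw [seg_snd_pos t l (l + 1) (r + 1) (b - t + 1 - 1) 1 (r - l + 1) b (by ring) (by ring) (by ring)]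
  rw [seg_fst_neg t l (b - 1) (t - 1) (r - l + 1 - 1) (b - t + 1 - 2) (-1) r (by ring) (by ring) (by ring)]
  rw [seg_snd_neg t l (r - 1) l 0 (r - l + 1 - 2) 0 t (by ring) (by ring) (by ring)]

lemma pvALoopCW_eq : ∀ (fa : Nat) (t b l r : Int) (coords : List (Int × Int)) (fb : Nat),
    ((b - t) + (r - l) + 2).toNat ≤ fa → (b - t + 1).toNat ≤ fb →
    pvALoopCW fa t b l r coords
      = coords ++ (pvBespiral pvBanilloCW fb (b - t + 1) (r - l + 1)).map (fun p => (p.1 + t, p.2 + l)) := by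
  intro fa
  induction fa with
  | zero =>
    intro t b l r coords fb h0 hfb
    rw [pvBespiral_nil _ _ _ _ (by omega)]
    simp [pvALoopCW]
  | succ fa ih =>
    intro t b l r coords fb hle hfb
    by_cases h : t ≤ b ∧ l ≤ r
    · obtain ⟨h1, h2⟩ := h
      obtain ⟨fb, rfl⟩ : ∃ k, fb = k + 1 := ⟨fb - 1, by omega⟩
      simp only [pvALoopCW]
      rw [if_pos (show t ≤ b ∧ l ≤ r from ⟨h1, h2⟩)]
      simp only [PySem.List.foldl_append_singleton_eq_map]
      by_cases hm : t + 1 ≤ b <;> by_cases hn : l ≤ r - 1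
      · simp only [if_pos hm, if_pos hn]
        rw [ih (t + 1) (b - 1) (l + 1) (r - 1) _ fb (by omega) (by omega)]
        simp only [pvBespiral]
        rw [if_neg (show ¬(b - t + 1 ≤ 0 ∨ r - l + 1 ≤ 0) by omega), List.map_append, ringCW_shift,
          if_pos (show (1:Int) < b - t + 1 by omega), if_pos (show (1:Int) < r - l + 1 by omega),
          inner_shift,
          show b - 1 - (t + 1) + 1 = b - t + 1 - 2 by ring,
          show r - 1 - (l + 1) + 1 = r - l + 1 - 2 by ring]
        simp [List.append_assoc]
      · simp only [if_pos hm, if_neg hn]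
        rw [ih (t + 1) (b - 1) l (r - 1) _ fb (by omega) (by omega)]
        simp only [pvBespiral]
        rw [if_neg (show ¬(b - t + 1 ≤ 0 ∨ r - l + 1 ≤ 0) by omega), List.map_append, ringCW_shift,
          if_pos (show (1:Int) < b - t + 1 by omega), if_neg (show ¬(1:Int) < r - l + 1 by omega)]
        rw [pvBespiral_nil _ _ _ _ (by omega), pvBespiral_nil _ _ _ _ (by omega)]
        simp [List.append_assoc]
      · simp only [if_neg hm, if_pos hn]
        rw [ih (t + 1) b (l + 1) (r - 1) _ fb (by omega) (by omega)]
        simp only [pvBespiral]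
        rw [if_neg (show ¬(b - t + 1 ≤ 0 ∨ r - l + 1 ≤ 0) by omega), List.map_append, ringCW_shift,
          if_neg (show ¬(1:Int) < b - t + 1 by omega), if_pos (show (1:Int) < r - l + 1 by omega)]
        rw [pvBespiral_nil _ _ _ _ (by omega), pvBespiral_nil _ _ _ _ (by omega)]
        rw [PySem.List.pyRange_neg_one_eq_nil (show b ≤ t + 1 - 1 by omega),
          PySem.List.pyRange_neg_one_eq_nil (show b - 1 ≤ t by omega)]
        simp [List.append_assoc]
      · simp only [if_neg hm, if_neg hn]
        rw [ih (t + 1) b l (r - 1) _ fb (by omega) (by omega)]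
        simp only [pvBespiral]
        rw [if_neg (show ¬(b - t + 1 ≤ 0 ∨ r - l + 1 ≤ 0) by omega), List.map_append, ringCW_shift,
          if_neg (show ¬(1:Int) < b - t + 1 by omega), if_neg (show ¬(1:Int) < r - l + 1 by omega)]
        rw [pvBespiral_nil _ _ _ _ (by omega), pvBespiral_nil _ _ _ _ (by omega)]
        simp [List.append_assoc]
    · simp only [pvALoopCW]
      rw [if_neg h, pvBespiral_nil _ _ _ _ (by omega)]
      simp

lemma pvALoopCCW_eq : ∀ (fa : Nat) (t b l r : Int) (coords : List (Int × Int)) (fb : Nat),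
    ((b - t) + (r - l) + 2).toNat ≤ fa → (b - t + 1).toNat ≤ fb →
    pvALoopCCW fa t b l r coords
      = coords ++ (pvBespiral pvBanilloCCW fb (b - t + 1) (r - l + 1)).map (fun p => (p.1 + t, p.2 + l)) := by
  intro fa
  induction fa with
  | zero =>
    intro t b l r coords fb h0 hfb
    rw [pvBespiral_nil _ _ _ _ (by omega)]
    simp [pvALoopCCW]
  | succ fa ih =>
    intro t b l r coords fb hle hfb
    by_cases h : t ≤ b ∧ l ≤ r
    · obtain ⟨h1, h2⟩ := h
      obtain ⟨fb, rfl⟩ : ∃ k, fb = k + 1 := ⟨fb - 1, by omega⟩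
      simp only [pvALoopCCW]
      rw [if_pos (show t ≤ b ∧ l ≤ r from ⟨h1, h2⟩)]
      simp only [PySem.List.foldl_append_singleton_eq_map]
      by_cases hn : l + 1 ≤ r <;> by_cases hm : t ≤ b - 1
      · simp only [if_pos hm, if_pos hn]
        rw [ih (t + 1) (b - 1) (l + 1) (r - 1) _ fb (by omega) (by omega)]
        simp only [pvBespiral]
        rw [if_neg (show ¬(b - t + 1 ≤ 0 ∨ r - l + 1 ≤ 0) by omega), List.map_append, ringCCW_shift,
          if_pos (show (1:Int) < b - t + 1 by omega), if_pos (show (1:Int) < r - l + 1 by omega),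
          inner_shift,
          show b - 1 - (t + 1) + 1 = b - t + 1 - 2 by ring,
          show r - 1 - (l + 1) + 1 = r - l + 1 - 2 by ring]
        simp [List.append_assoc]
      · simp only [if_neg hm, if_pos hn]
        rw [ih t (b - 1) (l + 1) (r - 1) _ fb (by omega) (by omega)]
        simp only [pvBespiral]
        rw [if_neg (show ¬(b - t + 1 ≤ 0 ∨ r - l + 1 ≤ 0) by omega), List.map_append, ringCCW_shift,
          if_neg (show ¬(1:Int) < b - t + 1 by omega), if_pos (show (1:Int) < r - l + 1 by omega)]
        rw [pvBespiral_nil _ _ _ _ (by omega), pvBespiral_nil _ _ _ _ (by omega)]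
        simp [List.append_assoc]
      · simp only [if_pos hm, if_neg hn]
        rw [ih (t + 1) (b - 1) (l + 1) r _ fb (by omega) (by omega)]
        simp only [pvBespiral]
        rw [if_neg (show ¬(b - t + 1 ≤ 0 ∨ r - l + 1 ≤ 0) by omega), List.map_append, ringCCW_shift,
          if_pos (show (1:Int) < b - t + 1 by omega), if_neg (show ¬(1:Int) < r - l + 1 by omega)]
        rw [pvBespiral_nil _ _ _ _ (by omega), pvBespiral_nil _ _ _ _ (by omega)]
        rw [PySem.List.pyRange_neg_one_eq_nil (show r ≤ l + 1 - 1 by omega),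
          PySem.List.pyRange_neg_one_eq_nil (show r - 1 ≤ l by omega)]
        simp [List.append_assoc]
      · simp only [if_neg hm, if_neg hn]
        rw [ih t (b - 1) (l + 1) r _ fb (by omega) (by omega)]
        simp only [pvBespiral]
        rw [if_neg (show ¬(b - t + 1 ≤ 0 ∨ r - l + 1 ≤ 0) by omega), List.map_append, ringCCW_shift,
          if_neg (show ¬(1:Int) < b - t + 1 by omega), if_neg (show ¬(1:Int) < r - l + 1 by omega)]
        rw [pvBespiral_nil _ _ _ _ (by omega), pvBespiral_nil _ _ _ _ (by omega)]
        simp [List.append_assoc]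
    · simp only [pvALoopCCW]
      rw [if_neg h, pvBespiral_nil _ _ _ _ (by omega)]
      simp

-- ===== VERDICT (by name: the statement is the Claim_ definition above) =====
theorem obtener_coordenadas_spec : Claim_equal_obtener_coordenadas := by
  intro filas columnas ruta _
  unfold Spec_obtener_coordenadas
  simp only [obtener_coordenadas, obtener_coordenadas_alt, pvBdispatch]
  split_ifs
  · simp only [PySem.List.foldl_append_singleton_eq_map, PySem.List.foldl_append_eq_flatMap,
      List.nil_append, pvBporColumnas, pvBceldas, List.map_flatMap, List.map_map, Function.comp_def]
  · simp only [PySem.List.foldl_append_singleton_eq_map, PySem.List.foldl_append_eq_flatMap,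
      List.nil_append, pvBporColumnas, pvBceldas, List.map_flatMap, List.map_map, Function.comp_def,
      map_down]
  · simp only [PySem.List.foldl_append_singleton_eq_map, PySem.List.foldl_append_eq_flatMap,
      List.nil_append, pvBceldas]
  · simp only [PySem.List.foldl_append_singleton_eq_map, PySem.List.foldl_append_eq_flatMap,
      List.nil_append, pvBceldas, List.map_flatMap, List.map_map, Function.comp_def, map_down]
  · simp only [PySem.List.foldl_append_singleton_eq_map, PySem.List.foldl_append_eq_flatMap,
      List.nil_append, pvBceldas, List.map_flatMap, List.map_map, Function.comp_def]
    refine List.flatMap_congr (fun f _ => ?_)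
    by_cases hf : PySem.Int.mod f 2 = 0
    · simp only [if_pos hf]
    · simp only [if_neg hf, map_down]
  · rw [pvALoopCW_eq _ 0 (filas - 1) 0 (columnas - 1) [] filas.toNat (by omega) (by omega)]
    have h1 : filas - 1 - 0 + 1 = filas := by ring
    have h2 : columnas - 1 - 0 + 1 = columnas := by ring
    rw [h1, h2]
    simp
  · rw [pvALoopCCW_eq _ 0 (filas - 1) 0 (columnas - 1) [] filas.toNat (by omega) (by omega)]
    have h1 : filas - 1 - 0 + 1 = filas := by ring
    have h2 : columnas - 1 - 0 + 1 = columnas := by ring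
    rw [h1, h2]
    simp
  · simp only [PySem.List.foldl_append_ite, PySem.List.foldl_append_eq_flatMap, List.nil_append,
      pvBdiagonal]
    exact (List.flatMap_congr (fun s _ => diag_col filas columnas s)).symm
  · rfl
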